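-- pv_equiv track=rewrite | github.com/iegorval/neural_nets | utils_rnn.py | word2idx
-- ===== SOURCE A (Python) =====
-- import string
--
-- def word2idx(data):
--     word_dict = {}
--     numeric_sentences = []
--     table = {ord(char): None for char in string.punctuation}
--     for line in data:
--         line = line.strip().replace('\n', '')
--         if line:
--             numeric_sentence = []
--             words = line.lower().translate(table).split()
--             for word in words:
--                 if word not in word_dict:
--                     word_dict[word] = len(word_dict)
--                 numeric_sentence.append(word_dict[word])
--             numeric_sentences.append(numeric_sentence)
--     reverse_dict = dict(zip(word_dict.values(), word_dict.keys()))
--     return numeric_sentences, word_dict, reverse_dict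
-- ===== SOURCE B (Python) =====
-- import string
--
-- def word2idx(data):
--     table = {ord(char): None for char in string.punctuation}
--     cleaned = [line.strip().replace('\n', '') for line in data]
--     token_lists = [line.lower().translate(table).split() for line in cleaned if line]
--     word_dict = {}
--     for tokens in token_lists:
--         for word in tokens:
--             if word not in word_dict:
--                 word_dict[word] = len(word_dict)
--     numeric_sentences = [[word_dict[word] for word in tokens] for tokens in token_lists]
--     reverse_dict = {idx: word for word, idx in word_dict.items()}
--     return numeric_sentences, word_dict, reverse_dict
-- ===== Notes on version B (the rewrite author's own statement) =====
-- stated objective: alternative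
-- what changed: Replaces A's single interleaved loop (growing vocab and emitting indices per word as it goes) with three separated passes: tokenize all lines first, then build the vocabulary index table over all tokens, then map every stored token list through the finished table; equivalence rests on the fact that vocabulary entries are never overwritten.
import Mathlib
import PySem

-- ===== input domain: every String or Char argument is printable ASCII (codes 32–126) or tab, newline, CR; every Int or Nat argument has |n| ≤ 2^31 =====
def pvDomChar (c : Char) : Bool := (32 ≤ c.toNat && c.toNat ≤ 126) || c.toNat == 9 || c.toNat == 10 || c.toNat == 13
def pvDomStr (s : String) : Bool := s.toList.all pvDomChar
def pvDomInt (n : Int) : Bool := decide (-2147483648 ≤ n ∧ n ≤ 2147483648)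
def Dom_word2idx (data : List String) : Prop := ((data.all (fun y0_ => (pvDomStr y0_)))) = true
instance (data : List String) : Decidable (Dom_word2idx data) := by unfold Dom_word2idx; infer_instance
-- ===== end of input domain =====

-- B separates A's single interleaved loop into three passes (tokenize, build vocab, map to
-- indices); same cost, clearer decomposition ("alternative").

-- ===== PORT A =====
-- string.punctuation
def pvPunct : List Char := "!\"#$%&'()*+,-./:;<=>?@[\\]^_`{|}~".toList

-- s.translate({ord(c): None for c in string.punctuation}): a pure deletion table over
-- ASCII punctuation — exact as dropping exactly those characters (hand port; PySem has no translate)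
def pvTranslateDel (s : String) : String :=
  String.ofList (s.toList.filter (fun c => !(pvPunct.contains c)))

-- line.strip().replace('\n', '')
def pvClean (line : String) : String :=
  PySem.Str.replace (PySem.Str.strip line) "\n" ""

-- line.lower().translate(table).split()
def pvWords (line : String) : List String :=
  PySem.Str.split₀ (pvTranslateDel (PySem.Str.lower line))

-- if word not in word_dict: word_dict[word] = len(word_dict)
def pvAddWord (d : PySem.Dict String Int) (word : String) : PySem.Dict String Int :=
  if d.contains word then d else d.insert word (d.size : Int)

-- A's inner loop body: grow the dict, then append word_dict[word]
def pvStepWord (p : PySem.Dict String Int × List Int) (word : String) :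
    PySem.Dict String Int × List Int :=
  let wd := pvAddWord p.1 word
  (wd, p.2 ++ [wd.getD word 0])

-- A's outer loop body over one raw line
def pvStepLine (st : PySem.Dict String Int × List (List Int)) (line0 : String) :
    PySem.Dict String Int × List (List Int) :=
  let line := pvClean line0
  if line = "" then st
  else
    let inner := (pvWords line).foldl pvStepWord (st.1, [])
    (inner.1, st.2 ++ [inner.2])

def word2idx (data : List String) :
    List (List Int) × (List (String × Int)) × (List (Int × String)) :=
  let st := data.foldl pvStepLine (PySem.Dict.empty, [])
  -- reverse_dict = dict(zip(word_dict.values(), word_dict.keys()))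
  let reverse : PySem.Dict Int String := PySem.Dict.ofList (List.zip st.1.values st.1.keys)
  (st.2, st.1.items, reverse.items)

-- ===== PORT B =====
def word2idx_alt (data : List String) :
    List (List Int) × (List (String × Int)) × (List (Int × String)) :=
  -- pass 1: clean every line, keep token lists of the non-empty cleaned lines
  let tokenLists := ((data.map pvClean).filter (fun l => l ≠ "")).map pvWords
  -- pass 2: build the vocabulary index table over all tokens
  let wordDict := tokenLists.foldl (fun d tokens => tokens.foldl pvAddWord d) PySem.Dict.empty
  -- pass 3: map every stored token list through the finished table
  let numeric := tokenLists.map (fun tokens => tokens.map (fun w => wordDict.getD w 0))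
  -- reverse_dict = {idx: word for word, idx in word_dict.items()}
  let reverse := wordDict.items.foldl
      (fun (d : PySem.Dict Int String) p => d.insert p.2 p.1) PySem.Dict.empty
  (numeric, wordDict.items, reverse.items)

-- ===== PRECONDITION & SPEC =====
def Spec_word2idx (data : List String) (out : List (List Int) × (List (String × Int)) × (List (Int × String))) : Prop := out = word2idx_alt data
instance (data : List String) (out : List (List Int) × (List (String × Int)) × (List (Int × String))) : Decidable (Spec_word2idx data out) := by unfold Spec_word2idx; infer_instance

-- ===== CLAIM (what is proved, stated in full; the proofs are below) =====
def Claim_equal_word2idx : Prop := ∀ (data : List String), Dom_word2idx data → Spec_word2idx data (word2idx data)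

-- ===== LEMMAS AND PROOFS =====

-- A's per-cleaned-line step, abstracted from pvStepLine's non-empty branch
def pvStepSent (st : PySem.Dict String Int × List (List Int)) (ts : List String) :
    PySem.Dict String Int × List (List Int) :=
  let inner := ts.foldl pvStepWord (st.1, [])
  (inner.1, st.2 ++ [inner.2])

-- once a word is in the dict, growing the dict never changes its entry
theorem pvAdd_mono (l : List String) (d : PySem.Dict String Int) (w : String)
    (h : d.contains w = true) :
    (l.foldl pvAddWord d).contains w = true ∧ (l.foldl pvAddWord d).getD w 0 = d.getD w 0 := by
  induction l generalizing d with
  | nil => exact ⟨h, rfl⟩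
  | cons x l ih =>
    simp only [List.foldl_cons]
    by_cases hx : d.contains x = true
    · simpa [pvAddWord, hx] using ih d h
    · have hne : w ≠ x := by
        intro e; rw [e] at h; exact hx h
      have hx' : pvAddWord d x = d.insert x (d.size : Int) := by
        simp [pvAddWord, hx]
      obtain ⟨c, g⟩ := ih (pvAddWord d x)
        (by rw [hx', PySem.Dict.contains_insert]; simp [h])
      refine ⟨c, ?_⟩
      rw [g, hx', PySem.Dict.getD_insert_of_ne _ _ _ hne]

theorem pvAddWord_contains_self (d : PySem.Dict String Int) (w : String) :
    (pvAddWord d w).contains w = true := by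
  by_cases h : d.contains w = true
  · simp [pvAddWord, h]
  · simp [pvAddWord, h, PySem.Dict.contains_insert_self]

theorem pvAdd_contains_of_mem (l : List String) (d : PySem.Dict String Int) (w : String)
    (h : w ∈ l) : (l.foldl pvAddWord d).contains w = true := by
  induction l generalizing d with
  | nil => cases h
  | cons x l ih =>
    simp only [List.foldl_cons]
    rcases List.mem_cons.mp h with rfl | hm
    · exact (pvAdd_mono l (pvAddWord d w) w (pvAddWord_contains_self d w)).1
    · exact ih (pvAddWord d x) hm

-- A's inner (sentence) loop: final dict, and indices looked up in it
theorem pvInner (words : List String) (d : PySem.Dict String Int) (sent : List Int) :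
    words.foldl pvStepWord (d, sent) =
      (words.foldl pvAddWord d,
       sent ++ words.map (fun w => (words.foldl pvAddWord d).getD w 0)) := by
  induction words generalizing d sent with
  | nil => simp
  | cons w ws ih =>
    simp only [List.foldl_cons]
    have hstep : pvStepWord (d, sent) w =
        (pvAddWord d w, sent ++ [(pvAddWord d w).getD w 0]) := rfl
    rw [hstep, ih]
    have hc := pvAddWord_contains_self d w
    have hg := (pvAdd_mono ws (pvAddWord d w) w hc).2
    simp [hg, List.append_assoc]

-- A's outer loop over token lists: fold of the vocab over all tokens, lookups in the final dict
theorem pvOuter (T : List (List String)) (d : PySem.Dict String Int) (ns : List (List Int)) :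
    T.foldl pvStepSent (d, ns) =
      (T.flatten.foldl pvAddWord d,
       ns ++ T.map (fun ts => ts.map (fun w => (T.flatten.foldl pvAddWord d).getD w 0))) := by
  induction T generalizing d ns with
  | nil => simp
  | cons ts T ih =>
    simp only [List.foldl_cons, List.flatten_cons, List.foldl_append]
    have hstep : pvStepSent (d, ns) ts =
        (ts.foldl pvAddWord d,
         ns ++ [ts.map (fun w => (ts.foldl pvAddWord d).getD w 0)]) := by
      simp [pvStepSent, pvInner]
    rw [hstep, ih]
    refine Prod.ext rfl ?_
    simp only [List.map_cons, List.append_assoc, List.singleton_append]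
    congr 2
    apply List.map_congr_left
    intro w hw
    exact ((pvAdd_mono (T.flatten) (ts.foldl pvAddWord d) w
      (pvAdd_contains_of_mem ts d w hw)).2).symm

-- A's fold over raw lines = the fold of pvStepSent over B's token lists
theorem pvBridge (data : List String) (d : PySem.Dict String Int) (ns : List (List Int)) :
    data.foldl pvStepLine (d, ns) =
      (((data.map pvClean).filter (fun l => l ≠ "")).map pvWords).foldl pvStepSent (d, ns) := by
  induction data generalizing d ns with
  | nil => rfl
  | cons line rest ih =>
    by_cases h : pvClean line = ""
    · have hstep : pvStepLine (d, ns) line = (d, ns) := by simp [pvStepLine, h]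
      simp only [List.foldl_cons, hstep, List.map_cons, List.filter_cons, h]
      simpa using ih d ns
    · have hstep : pvStepLine (d, ns) line = pvStepSent (d, ns) (pvWords (pvClean line)) := by
        simp [pvStepLine, pvStepSent, h]
      simp only [List.foldl_cons, hstep, List.map_cons, List.filter_cons]
      simp only [ne_eq, h, not_false_iff, decide_true, if_true, List.map_cons, List.foldl_cons]
      exact ih _ _
      
-- ===== VERDICT (by name: the statement is the Claim_ definition above) =====
theorem word2idx_spec : Claim_equal_word2idx := by
  unfold Claim_equal_word2idx
  intro data _
  have hfold := (pvBridge data PySem.Dict.empty []).trans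
    (pvOuter (((data.map pvClean).filter (fun l => l ≠ "")).map pvWords) PySem.Dict.empty [])
  have hT : word2idx data =
      ((data.foldl pvStepLine (PySem.Dict.empty, [])).2,
       (data.foldl pvStepLine (PySem.Dict.empty, [])).1.items,
       (PySem.Dict.ofList (List.zip (data.foldl pvStepLine (PySem.Dict.empty, [])).1.values
          (data.foldl pvStepLine (PySem.Dict.empty, [])).1.keys)).items) := rfl
  have hB : word2idx_alt data =
      ((((data.map pvClean).filter (fun l => l ≠ "")).map pvWords).map
         (fun tokens => tokens.map (fun w =>
           ((((data.map pvClean).filter (fun l => l ≠ "")).map pvWords).foldl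
             (fun d tokens => tokens.foldl pvAddWord d) PySem.Dict.empty).getD w 0)),
       ((((data.map pvClean).filter (fun l => l ≠ "")).map pvWords).foldl
          (fun d tokens => tokens.foldl pvAddWord d) PySem.Dict.empty).items,
       (((((data.map pvClean).filter (fun l => l ≠ "")).map pvWords).foldl
           (fun d tokens => tokens.foldl pvAddWord d) PySem.Dict.empty).items.foldl
          (fun (d : PySem.Dict Int String) p => d.insert p.2 p.1) PySem.Dict.empty).items) := rfl
  have hdict : (((data.map pvClean).filter (fun l => l ≠ "")).map pvWords).foldl
      (fun d tokens => tokens.foldl pvAddWord d) PySem.Dict.empty =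
      ((((data.map pvClean).filter (fun l => l ≠ "")).map pvWords).flatten).foldl
        pvAddWord PySem.Dict.empty := List.foldl_flatten.symm
  have hrev : ∀ (wd : PySem.Dict String Int),
      PySem.Dict.ofList (List.zip wd.values wd.keys) =
      wd.items.foldl (fun (d : PySem.Dict Int String) p => d.insert p.2 p.1) PySem.Dict.empty := by
    intro wd
    have hzip : List.zip wd.values wd.keys = wd.items.map (fun p => (p.2, p.1)) := by
      simp only [PySem.Dict.values, PySem.Dict.keys]
      exact List.zip_map'
    unfold PySem.Dict.ofList PySem.Dict.update
    rw [hzip, List.foldl_map]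
  unfold Spec_word2idx
  rw [hT, hB, hfold, hdict, hrev]
  simp
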